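-- pv_equiv track=rewrite | github.com/Firebladedoge229/RobloxStudioManager | src/downloader.py | capitalize_after_z
-- ===== SOURCE A (Python) =====
-- def capitalize_after_z(channel):
--     new_channel = ""
--     i = 0
--     while i < len(channel) - 1:
--         new_channel += channel[i]
--         if channel[i] == "z":
--             new_channel += channel[i + 1].upper()
--             i += 1
--         i += 1
--     if i < len(channel):
--         new_channel += channel[i]
--     return new_channel
-- ===== SOURCE B (Python) =====
-- import re
--
-- def capitalize_after_z(channel):
--     return re.sub(r"z(.)", lambda m: "z" + m.group(1).upper(), channel, flags=re.DOTALL)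
-- ===== Notes on version B (the rewrite author's own statement) =====
-- stated objective: faster
-- what changed: Replaces the index-walking while loop with quadratic string concatenation by a single non-overlapping regex substitution (DOTALL) that uppercases the character captured after each lowercase z.
import Mathlib
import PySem

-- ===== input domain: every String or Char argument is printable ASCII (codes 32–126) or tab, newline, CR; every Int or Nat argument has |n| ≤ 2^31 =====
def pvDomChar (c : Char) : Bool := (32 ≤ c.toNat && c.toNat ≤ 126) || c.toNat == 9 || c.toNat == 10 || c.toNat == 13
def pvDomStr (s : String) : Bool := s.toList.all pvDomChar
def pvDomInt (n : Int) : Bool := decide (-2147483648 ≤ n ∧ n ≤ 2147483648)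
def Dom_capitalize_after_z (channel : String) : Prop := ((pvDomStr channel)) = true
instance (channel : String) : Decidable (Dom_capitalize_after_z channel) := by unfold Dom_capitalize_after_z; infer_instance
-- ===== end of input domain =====

-- ===== PORT A =====
-- B replaces A's index-walking while loop by a single regex substitution; ports proved equal on Dom.
-- Literal port of A's while loop: state = (index i, accumulated string acc).
def azLoopA (l : List Char) (i : Nat) (acc : List Char) : List Char :=
  if h : i + 1 < l.length then        -- while i < len(channel) - 1
    let acc1 := acc ++ [l[i]]         -- new_channel += channel[i]
    if l[i] = 'z' then                -- if channel[i] == "z"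
      azLoopA l (i + 2) (acc1 ++ [PySem.Chars.upperChar l[i + 1]])  -- += channel[i+1].upper(); i += 2
    else
      azLoopA l (i + 1) acc1          -- i += 1
  else if h2 : i < l.length then acc ++ [l[i]]   -- if i < len(channel): new_channel += channel[i]
  else acc
termination_by l.length - i

def capitalize_after_z (channel : String) : String :=
  String.mk (azLoopA channel.toList 0 [])

-- ===== PORT B =====
-- Hand port of re.sub(r"z(.)", ..., flags=re.DOTALL): the non-overlapping left-to-right scan,
-- exact — each match consumes 'z' and the following character; a trailing 'z' stays unmatched.
def azAltGo : List Char → List Char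
  | [] => []
  | [c] => [c]
  | c :: d :: rest =>
      if c = 'z' then c :: PySem.Chars.upperChar d :: azAltGo rest
      else c :: azAltGo (d :: rest)

def capitalize_after_z_alt (channel : String) : String :=
  String.mk (azAltGo channel.toList)


def Spec_capitalize_after_z (channel : String) (out : String) : Prop := out = capitalize_after_z_alt channel
instance (channel : String) (out : String) : Decidable (Spec_capitalize_after_z channel out) := by unfold Spec_capitalize_after_z; infer_instance

-- ===== CLAIM (what is proved, stated in full; the proofs are below) =====
def Claim_equal_capitalize_after_z : Prop := ∀ (channel : String), Dom_capitalize_after_z channel → Spec_capitalize_after_z channel (capitalize_after_z channel)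


-- ===== LEMMAS AND PROOFS =====
theorem azLoopA_eq (l : List Char) (i : Nat) (acc : List Char) :
    azLoopA l i acc = acc ++ azAltGo (l.drop i) := by
  induction h : l.length - i using Nat.strong_induction_on generalizing i acc with
  | _ n ih =>
    subst h
    rw [azLoopA]
    by_cases h1 : i + 1 < l.length
    · have hi : i < l.length := by omega
      have hdrop : l.drop i = l[i] :: l[i + 1] :: l.drop (i + 2) := by
        rw [List.drop_eq_getElem_cons hi, List.drop_eq_getElem_cons h1]
      simp only [h1, dif_pos]
      by_cases hz : l[i] = 'z'
      · rw [if_pos hz, ih (l.length - (i + 2)) (by omega) (i + 2) _ rfl, hdrop, hz,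
          azAltGo]
        simp
      · have hd1 : l.drop (i + 1) = l[i + 1] :: l.drop (i + 2) :=
          List.drop_eq_getElem_cons h1
        rw [if_neg hz, ih (l.length - (i + 1)) (by omega) (i + 1) _ rfl, hd1,
          hdrop, azAltGo, if_neg hz]
        simp
    · simp only [h1, dif_neg, not_false_iff]
      by_cases h2 : i < l.length
      · have hdrop : l.drop i = [l[i]] := by
          rw [List.drop_eq_getElem_cons h2]
          have : l.drop (i + 1) = [] := List.drop_eq_nil_of_le (by omega)
          rw [this]
        simp [h2, hdrop, azAltGo]
      · have hdrop : l.drop i = [] := List.drop_eq_nil_of_le (by omega)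
        simp [h2, hdrop, azAltGo]

-- ===== VERDICT (by name: the statement is the Claim_ definition above) =====
theorem capitalize_after_z_spec : Claim_equal_capitalize_after_z := by
  intro channel _
  unfold Spec_capitalize_after_z capitalize_after_z capitalize_after_z_alt
  rw [azLoopA_eq]
  simp
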